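-- pv_equiv track=rewrite | github.com/kaist-amsg/LocalTransform | LocalTemplate/template_collector.py | match_each
-- ===== SOURCE A (Python) =====
-- import copy
-- from itertools import permutations
--
-- def combine_dict(d1, d2):
--     for k, v in d1.items():
--         if k in d2:
--             if v != d2[k]:
--                 return False
--         elif v in d2.values():
--             return False
--         else:
--             d2[k] = v
--     return d2
--
-- def match_each(preds, trues, matched_idx, ):
--     perms = list(permutations(preds, len(trues)))
--     ts = [item for elem in trues for item in elem]
--     ms = []
--     for perm in perms:
--         ps = [item for elem in perm for item in elem]
--         m = {t:p for t, p in zip(ts, ps) if t != -1}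
--         combined_dict = combine_dict(m, copy.copy(matched_idx))
--         if combined_dict:
--             ms.append(combined_dict)
--     return ms
-- ===== SOURCE B (Python) =====
-- def match_each(preds, trues, matched_idx):
--     ts = [t for g in trues for t in g]
--     out = []
--
--     def picks(items):
--         if not items:
--             return []
--         x, rest = items[0], items[1:]
--         return [(x, rest)] + [(y, [x] + ys) for y, ys in picks(rest)]
--
--     def merge_and_emit(m):
--         merged = dict(matched_idx)
--         used = set(merged.values())
--         for t, p in m.items():
--             if t in merged:
--                 if merged[t] != p:
--                     return
--             elif p in used:
--                 return
--             else:
--                 merged[t] = p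
--                 used.add(p)
--         if merged:
--             out.append(merged)
--
--     def rec(k, avail, off, m):
--         if k == 0:
--             merge_and_emit(m)
--             return
--         for pred, rest in picks(avail):
--             m2 = dict(m)
--             for t, p in zip(ts[off:off + len(pred)], pred):
--                 if t != -1:
--                     m2[t] = p
--             rec(k - 1, rest, off + len(pred), m2)
--
--     rec(len(trues), list(preds), 0, {})
--     return out
-- ===== Notes on version B (the rewrite author's own statement) =====
-- stated objective: alternative
-- what changed: Replaces the materialize-all-permutations-then-flatten-zip-filter-combine pipeline with a recursive backtracking search that assigns each true-group an available pred in index order, threading the partially built key/value dict (with a ts-offset for the zip truncation) and validating the merge against matched_idx with a used-values set at each complete assignment.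
import Mathlib
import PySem

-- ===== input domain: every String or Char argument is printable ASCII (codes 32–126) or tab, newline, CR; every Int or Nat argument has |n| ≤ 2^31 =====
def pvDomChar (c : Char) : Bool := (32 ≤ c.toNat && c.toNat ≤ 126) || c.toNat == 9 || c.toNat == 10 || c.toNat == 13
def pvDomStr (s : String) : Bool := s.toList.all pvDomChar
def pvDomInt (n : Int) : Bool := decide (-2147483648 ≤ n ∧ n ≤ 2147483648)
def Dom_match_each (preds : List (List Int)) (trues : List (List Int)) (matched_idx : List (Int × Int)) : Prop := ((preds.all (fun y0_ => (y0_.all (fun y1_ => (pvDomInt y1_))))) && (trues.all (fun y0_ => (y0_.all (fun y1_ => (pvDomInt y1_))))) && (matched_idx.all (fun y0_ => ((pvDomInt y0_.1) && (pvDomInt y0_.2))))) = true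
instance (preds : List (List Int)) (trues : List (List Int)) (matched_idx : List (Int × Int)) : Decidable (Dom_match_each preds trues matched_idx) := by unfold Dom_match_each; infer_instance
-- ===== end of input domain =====

-- B replaces the build-all-permutations-then-filter pipeline by a recursive search that
-- assigns each true-group a still-available pred, threading the growing key→value dict and
-- validating the merge with matched_idx once per complete assignment (alternative decomposition;
-- same results in the same order; neither program mutates its arguments).

-- ===== PORT A =====
-- shared step of the dict comprehension '{t:p for t, p in zip(ts, ps) if t != -1}' /
-- B's loop 'if t != -1: m2[t] = p' (overwrite keeps position, like Python's dict)
def insIf (d : PySem.Dict Int Int) (tp : Int × Int) : PySem.Dict Int Int :=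
  if tp.1 ≠ -1 then d.insert tp.1 tp.2 else d

-- combine_dict(d1, d2): iterate d1.items(); 'return False' becomes none
def combineLoop : List (Int × Int) → PySem.Dict Int Int → Option (PySem.Dict Int Int)
  | [], d2 => some d2
  | (k, v) :: rest, d2 =>
    if d2.contains k then
      if v ≠ d2.getD k 0 then none else combineLoop rest d2
    else if d2.values.contains v then none
    else combineLoop rest (d2.insert k v)

def match_each (preds : List (List Int)) (trues : List (List Int)) (matched_idx : List (Int × Int)) : List (List (Int × Int)) :=
  let perms := PySem.List.permutations preds trues.length
  let ts := trues.flatMap (fun elem => elem)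
  perms.foldl (fun ms perm =>
    let ps := perm.flatMap (fun elem => elem)
    let m := (ts.zip ps).foldl insIf (PySem.Dict.mk [])
    match combineLoop m.items (PySem.Dict.mk matched_idx) with
    | none => ms                                           -- combine_dict returned False
    | some cd => if cd.items ≠ [] then ms ++ [cd.items] else ms  -- empty dict is falsy
  ) []

-- ===== PORT B =====
-- picks(items): each element together with the remaining list, in index order
def picks {α : Type} : List α → List (α × List α)
  | [] => []
  | x :: rest => (x, rest) :: (picks rest).map (fun p => (p.1, x :: p.2))

-- merge loop of merge_and_emit: a used-value set alongside the merged dict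
def mergeLoop : List (Int × Int) → PySem.Dict Int Int → PySem.Set Int → Option (List (Int × Int))
  | [], merged, _ => some merged.items
  | (t, p) :: rest, merged, used =>
    if merged.contains t then
      if merged.getD t 0 ≠ p then none else mergeLoop rest merged used
    else if used.contains p then none
    else mergeLoop rest (merged.insert t p) (used.add p)

def mergeEmit (matched_idx : List (Int × Int)) (m : PySem.Dict Int Int) (out : List (List (Int × Int))) : List (List (Int × Int)) :=
  let merged := PySem.Dict.mk matched_idx
  match mergeLoop m.items merged (PySem.Set.ofList merged.values) with
  | none => out
  | some items => if items ≠ [] then out ++ [items] else out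

-- rec(k, avail, off, m): backtracking over the remaining group count
def recB (ts : List Int) (matched_idx : List (Int × Int)) : Nat → List (List Int) → Nat → PySem.Dict Int Int → List (List (Int × Int)) → List (List (Int × Int))
  | 0, _, _, m, out => mergeEmit matched_idx m out
  | k+1, avail, off, m, out =>
    (picks avail).foldl (fun out pr =>
      let m2 := ((PySem.List.slice ts (some (off : Int)) (some ((off : Int) + (pr.1.length : Int)))).zip pr.1).foldl insIf m
      recB ts matched_idx k pr.2 (off + pr.1.length) m2 out) out

def match_each_alt (preds : List (List Int)) (trues : List (List Int)) (matched_idx : List (Int × Int)) : List (List (Int × Int)) :=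
  let ts := trues.flatMap (fun g => g)
  recB ts matched_idx trues.length preds 0 (PySem.Dict.mk []) []

-- ===== PRECONDITION & SPEC =====
def Spec_match_each (preds : List (List Int)) (trues : List (List Int)) (matched_idx : List (Int × Int)) (out : List (List (Int × Int))) : Prop := out = match_each_alt preds trues matched_idx
instance (preds : List (List Int)) (trues : List (List Int)) (matched_idx : List (Int × Int)) (out : List (List (Int × Int))) : Decidable (Spec_match_each preds trues matched_idx out) := by unfold Spec_match_each; infer_instance

-- ===== CLAIM (what is proved, stated in full; the proofs are below) =====
def Claim_equal_match_each : Prop := ∀ (preds : List (List Int)) (trues : List (List Int)) (matched_idx : List (Int × Int)), Dom_match_each preds trues matched_idx → Spec_match_each preds trues matched_idx (match_each preds trues matched_idx)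

-- ===== LEMMAS AND PROOFS =====

-- the one-result emit of A, as a 0/1-element list
def emitA (matched_idx : List (Int × Int)) (m : PySem.Dict Int Int) : List (List (Int × Int)) :=
  match combineLoop m.items (PySem.Dict.mk matched_idx) with
  | none => []
  | some cd => if cd.items ≠ [] then [cd.items] else []

-- the one-result emit of B, as a 0/1-element list
def emitB (matched_idx : List (Int × Int)) (m : PySem.Dict Int Int) : List (List (Int × Int)) :=
  match mergeLoop m.items (PySem.Dict.mk matched_idx) (PySem.Set.ofList (PySem.Dict.mk matched_idx).values) with
  | none => []
  | some items => if items ≠ [] then [items] else []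

lemma set_add_contains (s : PySem.Set Int) (v x : Int) :
    (s.add v).contains x = (s.contains x || x == v) := by
  simp only [PySem.Set.add]
  split
  · rename_i h
    by_cases hx : x = v
    · subst hx; simp [List.mem_of_elem_eq_true h]
    · simp [hx]
  · by_cases hx : x = v
    · subst hx; simp
    · simp [hx]

lemma values_insert_not_contains (d : PySem.Dict Int Int) (k v : Int) (h : d.contains k = false) :
    (d.insert k v).values = d.values ++ [v] := by
  simp [PySem.Dict.values, PySem.Dict.items_insert_of_not_contains d v h]

lemma mergeLoop_eq_combineLoop :
    ∀ (items : List (Int × Int)) (d2 : PySem.Dict Int Int) (used : PySem.Set Int),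
      (∀ x : Int, used.contains x = d2.values.contains x) →
      mergeLoop items d2 used = (combineLoop items d2).map (fun cd => cd.items) := by
  intro items
  induction items with
  | nil => intro d2 used _; simp [mergeLoop, combineLoop]
  | cons hd rest ih =>
    intro d2 used hinv
    obtain ⟨k, v⟩ := hd
    simp only [mergeLoop, combineLoop]
    by_cases hc : d2.contains k
    · simp only [hc, if_pos]
      by_cases hv : d2.getD k 0 ≠ v
      · have : v ≠ d2.getD k 0 := fun h => hv h.symm
        simp [this, hv]
      · rw [not_not] at hv
        simp [hv, ih d2 used hinv]
    · simp only [Bool.not_eq_true] at hc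
      simp only [hc, Bool.false_eq_true, if_false]
      rw [hinv v]
      by_cases hu : v ∈ d2.values
      · simp [List.contains_iff_mem, hu]
      · rw [if_neg (by simpa using hu), if_neg (show ¬ d2.values.contains v = true by simpa using hu)]
        apply ih
        intro x
        rw [set_add_contains, hinv x, values_insert_not_contains d2 k v hc]
        by_cases hx : x = v
        · subst hx; simp
        · simp [hx]

lemma emitB_eq_emitA (matched_idx : List (Int × Int)) (m : PySem.Dict Int Int) :
    emitB matched_idx m = emitA matched_idx m := by
  unfold emitA emitB
  rw [mergeLoop_eq_combineLoop _ _ _ (fun x => by simp [PySem.Set.mem_ofList])]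
  cases combineLoop m.items (PySem.Dict.mk matched_idx) <;> simp

-- zip against an appended right list splits at the boundary
lemma zip_append_right {α β : Type} (ys zs : List β) :
    ∀ (xs : List α), xs.zip (ys ++ zs) = (xs.take ys.length).zip ys ++ (xs.drop ys.length).zip zs := by
  induction ys with
  | nil => intro xs; simp
  | cons y ys ih =>
    intro xs
    cases xs with
    | nil => simp
    | cons x xs => simp [List.zip_cons_cons, ih xs]

-- itertools.permutations at r+1, through picks
lemma flatMap_index_picks {α β : Type} [Inhabited α] :
    ∀ (xs : List α) (F : α → List α → List β),
      (List.range xs.length).flatMap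
          (fun i => match xs[i]? with
                    | none => []
                    | some x => F x (xs.eraseIdx i))
        = (picks xs).flatMap (fun pr => F pr.1 pr.2) := by
  intro xs
  induction xs with
  | nil => intro F; simp [picks]
  | cons x rest ih =>
    intro F
    rw [List.length_cons, List.range_succ_eq_map, List.flatMap_cons, List.flatMap_map]
    simp only [List.getElem?_cons_succ, List.eraseIdx_cons_succ, List.getElem?_cons_zero,
      List.eraseIdx_cons_zero]
    rw [ih (fun y ys => F y (x :: ys))]
    simp [picks, List.flatMap_map]

lemma perms_succ {α : Type} [Inhabited α] (xs : List α) (r : Nat) :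
    PySem.List.permutations xs (r+1)
      = (picks xs).flatMap (fun pr => (PySem.List.permutations pr.2 r).map (pr.1 :: ·)) := by
  rw [PySem.List.permutations]
  exact flatMap_index_picks xs (fun x ys => (PySem.List.permutations ys r).map (x :: ·))

-- recB threads its accumulator by appending
def gB (ts : List Int) (mi : List (Int × Int)) : Nat → List (List Int) → Nat → PySem.Dict Int Int → List (List (Int × Int))
  | 0, _, _, m => emitB mi m
  | k+1, avail, off, m =>
    (picks avail).flatMap (fun pr =>
      gB ts mi k pr.2 (off + pr.1.length)
        (((PySem.List.slice ts (some (off : Int)) (some ((off : Int) + (pr.1.length : Int)))).zip pr.1).foldl insIf m))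

lemma recB_eq_gB (ts : List Int) (mi : List (Int × Int)) :
    ∀ (k : Nat) (avail : List (List Int)) (off : Nat) (m : PySem.Dict Int Int) (out : List (List (Int × Int))),
      recB ts mi k avail off m out = out ++ gB ts mi k avail off m := by
  intro k
  induction k with
  | zero =>
    intro avail off m out
    simp only [recB, gB, mergeEmit, emitB]
    cases mergeLoop m.items (PySem.Dict.mk mi) (PySem.Set.ofList (PySem.Dict.mk mi).values) with
    | none => simp
    | some items => by_cases h : items = [] <;> simp [h]
  | succ k ih =>
    intro avail off m out
    simp only [recB, gB]
    have hstep : (fun (out : List (List (Int × Int))) (pr : List Int × List (List Int)) =>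
        recB ts mi k pr.2 (off + pr.1.length)
          (((PySem.List.slice ts (some (off : Int)) (some ((off : Int) + (pr.1.length : Int)))).zip pr.1).foldl insIf m) out)
        = fun out pr => out ++ (fun pr => gB ts mi k pr.2 (off + pr.1.length)
          (((PySem.List.slice ts (some (off : Int)) (some ((off : Int) + (pr.1.length : Int)))).zip pr.1).foldl insIf m)) pr := by
      funext o pr; exact ih pr.2 (off + pr.1.length) _ o
    rw [hstep, PySem.List.foldl_append_eq_flatMap]

-- the main correspondence: the backtracking search computes A's flatMap over permutations
lemma gB_eq_perms (ts : List Int) (mi : List (Int × Int)) :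
    ∀ (k : Nat) (avail : List (List Int)) (off : Nat) (m : PySem.Dict Int Int),
      gB ts mi k avail off m
        = (PySem.List.permutations avail k).flatMap (fun perm =>
            emitA mi (((ts.drop off).zip (perm.flatMap (fun g => g))).foldl insIf m)) := by
  intro k
  induction k with
  | zero =>
    intro avail off m
    simp [gB, PySem.List.permutations, emitB_eq_emitA]
  | succ k ih =>
    intro avail off m
    rw [gB, perms_succ, List.flatMap_assoc]
    refine congrArg (fun f => List.flatMap f (picks avail)) (funext fun pr => ?_)
    rw [ih pr.2 (off + pr.1.length) _, List.flatMap_map]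
    refine congrArg (fun f => List.flatMap f (PySem.List.permutations pr.2 k)) (funext fun perm => ?_)
    have hbuild : ((ts.drop (off + pr.1.length)).zip (perm.flatMap (fun g => g))).foldl insIf
        (((PySem.List.slice ts (some (off : Int)) (some ((off : Int) + (pr.1.length : Int)))).zip pr.1).foldl insIf m)
        = ((ts.drop off).zip ((pr.1 :: perm).flatMap (fun g => g))).foldl insIf m := by
      rw [List.flatMap_cons, zip_append_right, List.foldl_append,
        PySem.List.slice_natCast_add, List.drop_drop]
    rw [hbuild]

-- ===== VERDICT (by name: the statement is the Claim_ definition above) =====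
theorem match_each_spec : Claim_equal_match_each := by
  intro preds trues matched_idx _
  unfold Spec_match_each
  show match_each preds trues matched_idx = match_each_alt preds trues matched_idx
  show List.foldl (fun ms perm =>
      match combineLoop (((trues.flatMap (fun elem => elem)).zip (perm.flatMap (fun elem => elem))).foldl insIf (PySem.Dict.mk [])).items (PySem.Dict.mk matched_idx) with
      | none => ms
      | some cd => if cd.items ≠ [] then ms ++ [cd.items] else ms) [] (PySem.List.permutations preds trues.length)
    = recB (trues.flatMap (fun g => g)) matched_idx trues.length preds 0 (PySem.Dict.mk []) []
  rw [recB_eq_gB, gB_eq_perms, List.nil_append]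
  have hstep : (fun (ms : List (List (Int × Int))) (perm : List (List Int)) =>
      match combineLoop (((trues.flatMap (fun elem => elem)).zip (perm.flatMap (fun elem => elem))).foldl insIf (PySem.Dict.mk [])).items (PySem.Dict.mk matched_idx) with
      | none => ms
      | some cd => if cd.items ≠ [] then ms ++ [cd.items] else ms)
      = fun ms perm => ms ++ emitA matched_idx (((trues.flatMap (fun elem => elem)).zip (perm.flatMap (fun elem => elem))).foldl insIf (PySem.Dict.mk [])) := by
    funext ms perm
    unfold emitA
    cases combineLoop (((trues.flatMap (fun elem => elem)).zip (perm.flatMap (fun elem => elem))).foldl insIf (PySem.Dict.mk [])).items (PySem.Dict.mk matched_idx) with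
    | none => simp
    | some cd => by_cases h : cd.items = [] <;> simp [h]
  rw [hstep, PySem.List.foldl_append_eq_flatMap, List.nil_append, List.drop_zero]
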